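-- pv_equiv track=rewrite | github.com/sunnyhxu/Matroid10 | python/hardness_metrics.py | macaulay_next
-- ===== SOURCE A (Python) =====
-- from math import comb, log1p
--
-- def macaulay_next(value: int, degree: int) -> int:
--     if degree < 1:
--         raise ValueError("degree must be at least 1")
--     if value < 0:
--         raise ValueError("value must be non-negative")
--     if value == 0:
--         return 0
--
--     remainder = value
--     upper_bound: int | None = None
--     total = 0
--
--     for current_degree in range(degree, 0, -1):
--         candidate = current_degree
--         while True:
--             next_candidate = candidate + 1
--             if upper_bound is not None and next_candidate >= upper_bound:
--                 break
--             if comb(next_candidate, current_degree) > remainder: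
--                 break
--             candidate = next_candidate
--
--         if candidate >= current_degree and comb(candidate, current_degree) <= remainder:
--             remainder -= comb(candidate, current_degree)
--             upper_bound = candidate
--             total += comb(candidate + 1, current_degree + 1)
--         else:
--             upper_bound = current_degree
--
--     return total
-- ===== SOURCE B (Python) =====
-- from math import comb
--
--
-- def macaulay_next(value: int, degree: int) -> int:
--     if degree < 1:
--         raise ValueError("degree must be at least 1")
--     if value < 0:
--         raise ValueError("value must be non-negative")
--     if value == 0:
--         return 0
--
--     remainder = value
--     upper_bound = None
--     total = 0
--
--     for d in range(degree, 0, -1):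
--         # the candidate lives in [d, cap]
--         # (comb(c, d) > remainder for every c > remainder + d, so cap is safe)
--         cap = remainder + d
--         if upper_bound is not None and upper_bound - 1 < cap:
--             cap = upper_bound - 1
--         if cap <= d:
--             # squeezed: every remaining degree takes comb(d', d') = 1 until the
--             # remainder runs out, adding comb(d'+1, d'+1) = 1 each time
--             return total + (remainder if remainder < d else d)
--         # gallop: double the step while the jump target still fits
--         lo = d
--         step = 1
--         while lo + step <= cap and comb(lo + step, d) <= remainder:
--             lo += step
--             step += step
--         # binary search inside the last bracket
--         hi = lo + step - 1
--         if cap < hi: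
--             hi = cap
--         while lo < hi:
--             mid = (lo + hi + 1) // 2
--             if comb(mid, d) <= remainder:
--                 lo = mid
--             else:
--                 hi = mid - 1
--         cc = comb(lo, d)
--         if cc <= remainder:
--             remainder -= cc
--             upper_bound = lo
--             total += comb(lo + 1, d + 1)
--         else:
--             upper_bound = d
--
--     return total
-- ===== Notes on version B (the rewrite author's own statement) =====
-- stated objective: faster
-- what changed: A's inner linear scan (increment the candidate by 1 until comb exceeds the remainder) is replaced by a galloping doubling search plus a binary search in the last bracket, and once the recorded upper bound squeezes the candidate range to a single point the whole remaining degree loop is collapsed into the closed form total + min(remainder, d).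
import Mathlib
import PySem

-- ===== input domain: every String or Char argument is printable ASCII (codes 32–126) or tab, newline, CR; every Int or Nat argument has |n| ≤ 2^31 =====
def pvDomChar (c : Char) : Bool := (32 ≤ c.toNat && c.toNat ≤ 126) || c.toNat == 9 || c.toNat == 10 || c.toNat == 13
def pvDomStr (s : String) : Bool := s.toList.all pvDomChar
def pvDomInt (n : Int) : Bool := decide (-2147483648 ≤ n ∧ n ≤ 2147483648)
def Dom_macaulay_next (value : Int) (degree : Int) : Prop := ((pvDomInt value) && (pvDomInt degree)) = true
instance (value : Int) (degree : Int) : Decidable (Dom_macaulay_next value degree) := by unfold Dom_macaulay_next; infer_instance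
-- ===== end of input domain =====

-- B replaces A's linear candidate increment by a gallop-plus-binary search for the
-- largest candidate with comb(candidate, d) ≤ remainder, and collapses the squeezed
-- tail of the degree loop into total + min(remainder, d) (objective: faster, measured).

-- ===== PORT A =====
-- 'upper_bound is not None and next_candidate >= upper_bound'
def pvUbHit (ub : Option Nat) (nc : Nat) : Bool :=
  match ub with
  | some u => u ≤ nc
  | none => false

-- Python's math.comb: comb(n, k) via the descending product over min(k, n-k)
-- factors (0 when k > n), exactly CPython's strategy; used by both ports.
def pyComb (n k : Nat) : Nat :=
  if n < k then 0
  else if n - k < k then Nat.descFactorial n (n - k) / Nat.factorial (n - k)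
  else Nat.descFactorial n k / Nat.factorial k

-- A's inner 'while True' loop; d is current_degree - 1 (current_degree = d+1 ≥ 1).
-- The fuel argument only bounds the iteration count (comb(c+1, d+1) ≤ r forces
-- c ≤ r + d, so fuel r+1 from start c = d+1 is never exhausted; macGrow_stop below).
def macGrow (fuel : Nat) (d r : Nat) (ub : Option Nat) (c : Nat) : Nat :=
  match fuel with
  | 0 => c
  | fuel + 1 =>
    if pvUbHit ub (c + 1) then c
    else if r < pyComb (c + 1) (d + 1) then c
    else macGrow fuel d r ub (c + 1)

-- A's 'for current_degree in range(degree, 0, -1)' loop over (remainder, upper_bound, total).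
def macLoop : Nat → Nat → Option Nat → Nat → Nat
  | 0, _, _, total => total
  | cd + 1, r, ub, total =>
    let c := macGrow (r + 1) cd r ub (cd + 1)
    if cd + 1 ≤ c ∧ pyComb c (cd + 1) ≤ r then
      macLoop cd (r - pyComb c (cd + 1)) (some c) (total + pyComb (c + 1) (cd + 2))
    else
      macLoop cd r (some (cd + 1)) total

def macaulay_next (value : Int) (degree : Int) : Int :=
  if degree < 1 then 0        -- Python raises ValueError here (outside Pre_)
  else if value < 0 then 0    -- Python raises ValueError here (outside Pre_)
  else if value = 0 then 0
  else (macLoop degree.toNat value.toNat none 0 : Int)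

-- ===== PORT B =====
-- B's gallop ('while lo + step <= cap and comb(...) <= remainder' in Source B):
-- doubles the step while the jump target still satisfies the bound.
-- The fuel argument only bounds the iteration count (lo grows by at least 1
-- per step, so fuel cap + 1 from lo = d + 1 is never exhausted; macGallop_stop below).
def macGallop (fuel : Nat) (d r cap : Nat) (lo step : Nat) : Nat × Nat :=
  match fuel with
  | 0 => (lo, step)
  | fuel + 1 =>
    if lo + step ≤ cap ∧ pyComb (lo + step) (d + 1) ≤ r then
      macGallop fuel d r cap (lo + step) (step + step)
    else (lo, step)

-- B's binary search ('while lo < hi' in Source B): largest c in [lo, hi] with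
-- comb(c, d+1) ≤ r (lo if none).  The gap hi - lo shrinks every iteration,
-- so fuel hi - lo is never exhausted (macSearch_stop below).
def macSearch (fuel : Nat) (d r lo hi : Nat) : Nat :=
  match fuel with
  | 0 => lo
  | fuel + 1 =>
    if lo < hi then
      if pyComb ((lo + hi + 1) / 2) (d + 1) ≤ r then macSearch fuel d r ((lo + hi + 1) / 2) hi
      else macSearch fuel d r lo ((lo + hi + 1) / 2 - 1)
    else lo

-- B's per-degree candidate search: gallop, then binary search in the last bracket.
def macFind (d r cap : Nat) : Nat :=
  let g := macGallop (cap + 1) d r cap (d + 1) 1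
  let hi := if cap < g.1 + g.2 - 1 then cap else g.1 + g.2 - 1
  macSearch (hi - g.1) d r g.1 hi

-- B's 'for d in range(degree, 0, -1)' loop with the squeezed-tail early return.
def macLoopB : Nat → Nat → Option Nat → Nat → Nat
  | 0, _, _, total => total
  | cd + 1, r, ub, total =>
    let hi0 := r + (cd + 1)
    let cap := match ub with
      | some u => if u - 1 < hi0 then u - 1 else hi0
      | none => hi0
    if cap ≤ cd + 1 then total + (if r < cd + 1 then r else cd + 1)
    else
      let c := macFind cd r cap
      let cc := pyComb c (cd + 1)
      if cc ≤ r then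
        macLoopB cd (r - cc) (some c) (total + pyComb (c + 1) (cd + 2))
      else
        macLoopB cd r (some (cd + 1)) total

def macaulay_next_alt (value : Int) (degree : Int) : Int :=
  if degree < 1 then 0
  else if value < 0 then 0
  else if value = 0 then 0
  else (macLoopB degree.toNat value.toNat none 0 : Int)

-- ===== PRECONDITION & SPEC =====
-- Pre_: exactly the inputs on which Python A returns (it raises ValueError on degree < 1 or value < 0).
def Pre_macaulay_next (value : Int) (degree : Int) : Prop := 1 ≤ degree ∧ 0 ≤ value
instance (value : Int) (degree : Int) : Decidable (Pre_macaulay_next value degree) := by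
  unfold Pre_macaulay_next; infer_instance

def pvWitness_macaulay_next : Int × Int := (10, 2)

def Spec_macaulay_next (value : Int) (degree : Int) (out : Int) : Prop := out = macaulay_next_alt value degree
instance (value : Int) (degree : Int) (out : Int) : Decidable (Spec_macaulay_next value degree out) := by
  unfold Spec_macaulay_next; infer_instance

-- ===== CLAIM (what is proved, stated in full; the proofs are below) =====
def Claim_equal_macaulay_next : Prop := ∀ (value : Int) (degree : Int), Dom_macaulay_next value degree → Pre_macaulay_next value degree → Spec_macaulay_next value degree (macaulay_next value degree)

-- ===== LEMMAS AND PROOFS =====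

-- pyComb is the binomial coefficient.
theorem pyComb_eq (n k : Nat) : pyComb n k = Nat.choose n k := by
  unfold pyComb
  split
  · rename_i h
    exact (Nat.choose_eq_zero_of_lt h).symm
  · rename_i h
    split
    · rw [← Nat.choose_eq_descFactorial_div_factorial]
      exact Nat.choose_symm (by omega)
    · rw [← Nat.choose_eq_descFactorial_div_factorial]

-- comb(c, d) ≥ c - d + 1 for 1 ≤ d ≤ c.
theorem pv_choose_lb (n k : Nat) (h1 : 1 ≤ k) (h2 : k ≤ n) :
    n - k + 1 ≤ Nat.choose n k := by
  have hs : Nat.choose n (n - k) = Nat.choose n k := Nat.choose_symm h2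
  have h4 : Nat.choose (n - k + 1) (n - k) ≤ Nat.choose n (n - k) :=
    Nat.choose_le_choose _ (by omega)
  rw [Nat.choose_succ_self_right] at h4
  omega

-- comb(x, d+1) ≤ r forces x ≤ r + d + 1.
theorem choose_le_bound (d r x : Nat) (h : Nat.choose x (d + 1) ≤ r) : x ≤ r + d + 1 := by
  by_cases hx : d + 1 ≤ x
  · have := pv_choose_lb x (d + 1) (by omega) hx
    omega
  · omega

-- The continuation condition of A's inner loop.
def contP (d r : Nat) (ub : Option Nat) (x : Nat) : Prop :=
  pvUbHit ub x = false ∧ Nat.choose x (d + 1) ≤ r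

theorem macGrow_ge (fuel d r : Nat) (ub : Option Nat) : ∀ c, c ≤ macGrow fuel d r ub c := by
  induction fuel with
  | zero => intro c; simp [macGrow]
  | succ fuel ih =>
    intro c
    rw [macGrow]
    simp only [pyComb_eq]
    split
    · exact le_refl c
    · split
      · exact le_refl c
      · exact le_trans (by omega) (ih (c + 1))

theorem macGrow_mem (fuel d r : Nat) (ub : Option Nat) :
    ∀ c x, c < x → x ≤ macGrow fuel d r ub c → contP d r ub x := by
  induction fuel with
  | zero => intro c x hx1 hx2; simp [macGrow] at hx2; omega
  | succ fuel ih =>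
    intro c x hx1 hx2
    rw [macGrow] at hx2
    simp only [pyComb_eq] at hx2
    split at hx2
    · omega
    · split at hx2
      · omega
      · rename_i h1 h2
        rcases Nat.lt_or_ge (c + 1) x with h | h
        · exact ih (c + 1) x h hx2
        · have hx : x = c + 1 := by omega
          subst hx
          exact ⟨by simpa using h1, by omega⟩

-- with enough fuel, the loop really stopped: the continuation condition fails past the result
theorem macGrow_stop (fuel d r : Nat) (ub : Option Nat) :
    ∀ c, r + d + 2 - c ≤ fuel → ¬ contP d r ub (macGrow fuel d r ub c + 1) := by
  induction fuel with
  | zero =>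
    intro c hf hc
    simp only [macGrow] at hc
    have := choose_le_bound d r _ hc.2
    omega
  | succ fuel ih =>
    intro c hf
    rw [macGrow]
    simp only [pyComb_eq]
    split
    · rename_i h1
      intro hc
      rw [hc.1] at h1
      exact absurd h1 (by simp)
    · split
      · rename_i h1 h2
        intro hc
        exact absurd hc.2 (by omega)
      · rename_i h1 h2
        have hb : Nat.choose (c + 1) (d + 1) ≤ r := by omega
        have := choose_le_bound d r (c + 1) hb
        exact ih (c + 1) (by omega)

theorem macSearch_ge (fuel d r : Nat) : ∀ lo hi, lo ≤ macSearch fuel d r lo hi := by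
  induction fuel with
  | zero => intro lo hi; simp [macSearch]
  | succ fuel ih =>
    intro lo hi
    rw [macSearch]
    split
    · split
      · exact le_trans (by omega) (ih _ _)
      · exact ih _ _
    · exact le_refl lo

theorem macSearch_le (fuel d r : Nat) : ∀ lo hi, lo ≤ hi → macSearch fuel d r lo hi ≤ hi := by
  induction fuel with
  | zero => intro lo hi h; simpa [macSearch]
  | succ fuel ih =>
    intro lo hi h
    rw [macSearch]
    split
    · rename_i h1
      split
      · exact ih _ _ (by omega)
      · exact le_trans (ih _ _ (by omega)) (by omega)
    · exact h

theorem macSearch_q (fuel d r : Nat) : ∀ lo hi,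
    macSearch fuel d r lo hi = lo ∨ Nat.choose (macSearch fuel d r lo hi) (d + 1) ≤ r := by
  induction fuel with
  | zero => intro lo hi; left; rfl
  | succ fuel ih =>
    intro lo hi
    rw [macSearch]
    simp only [pyComb_eq]
    split
    · split
      · rename_i h1 h2
        rcases ih ((lo + hi + 1) / 2) hi with h | h
        · right; rw [h]; exact h2
        · right; exact h
      · exact ih _ _
    · left; rfl

-- with enough fuel, the search really finished: the result is hi or its successor fails
theorem macSearch_stop (fuel d r : Nat) : ∀ lo hi, lo ≤ hi → hi - lo ≤ fuel →
    macSearch fuel d r lo hi = hi ∨ r < Nat.choose (macSearch fuel d r lo hi + 1) (d + 1) := by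
  induction fuel with
  | zero =>
    intro lo hi h hf
    left
    simp [macSearch]
    omega
  | succ fuel ih =>
    intro lo hi h hf
    rw [macSearch]
    simp only [pyComb_eq]
    split
    · rename_i h1
      split
      · rename_i h2
        exact ih _ _ (by omega) (by omega)
      · rename_i h2
        rcases ih lo ((lo + hi + 1) / 2 - 1) (by omega) (by omega) with h3 | h3
        · right
          rw [h3]
          have he : (lo + hi + 1) / 2 - 1 + 1 = (lo + hi + 1) / 2 := by omega
          rw [he]
          omega
        · right; exact h3
    · left; omega

theorem macGallop_ge (d r cap : Nat) : ∀ fuel lo step, lo ≤ (macGallop fuel d r cap lo step).1 := by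
  intro fuel
  induction fuel with
  | zero => intro lo step; simp [macGallop]
  | succ fuel ih =>
    intro lo step
    rw [macGallop]
    split
    · exact le_trans (by omega) (ih (lo + step) (step + step))
    · exact le_refl lo

theorem macGallop_step (d r cap : Nat) : ∀ fuel lo step, 1 ≤ step →
    1 ≤ (macGallop fuel d r cap lo step).2 := by
  intro fuel
  induction fuel with
  | zero => intro lo step h; simpa [macGallop]
  | succ fuel ih =>
    intro lo step h
    rw [macGallop]
    split
    · exact ih (lo + step) (step + step) (by omega)
    · exact h

-- the gallop result is the start or satisfies the searched predicate
theorem macGallop_good (d r cap : Nat) : ∀ fuel lo step,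
    (macGallop fuel d r cap lo step).1 = lo ∨
      (Nat.choose (macGallop fuel d r cap lo step).1 (d + 1) ≤ r ∧
        (macGallop fuel d r cap lo step).1 ≤ cap) := by
  intro fuel
  induction fuel with
  | zero => intro lo step; left; rfl
  | succ fuel ih =>
    intro lo step
    rw [macGallop]
    split
    · rename_i h
      rw [pyComb_eq] at h
      rcases ih (lo + step) (step + step) with h2 | h2
      · right; rw [h2]; exact ⟨h.2, h.1⟩
      · right; exact h2
    · left; rfl

-- with enough fuel, the gallop really stopped: the next jump target fails
theorem macGallop_stop (d r cap : Nat) : ∀ fuel lo step, cap + 1 ≤ fuel + lo → 1 ≤ step →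
    ¬((macGallop fuel d r cap lo step).1 + (macGallop fuel d r cap lo step).2 ≤ cap ∧
      Nat.choose ((macGallop fuel d r cap lo step).1 + (macGallop fuel d r cap lo step).2) (d + 1) ≤ r) := by
  intro fuel
  induction fuel with
  | zero =>
    intro lo step hf hs
    simp only [macGallop]
    omega
  | succ fuel ih =>
    intro lo step hf hs
    rw [macGallop]
    split
    · exact ih (lo + step) (step + step) (by omega) (by omega)
    · rename_i h
      rw [pyComb_eq] at h
      simp only
      omega

-- contP rewritten as the range predicate B searches over.
theorem contP_iff (d r : Nat) (ub : Option Nat) (hi : Nat)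
    (hhi : hi = (match ub with
      | some u => if u - 1 < r + (d + 1) then u - 1 else r + (d + 1)
      | none => r + (d + 1)))
    (hub : ∀ u, ub = some u → d + 2 ≤ u) (x : Nat) :
    contP d r ub x ↔ (Nat.choose x (d + 1) ≤ r ∧ x ≤ hi) := by
  cases ub with
  | none =>
    simp only at hhi
    constructor
    · rintro ⟨_, h2⟩
      exact ⟨h2, by have := choose_le_bound d r x h2; omega⟩
    · rintro ⟨h2, _⟩
      exact ⟨rfl, h2⟩
  | some u =>
    have hu : d + 2 ≤ u := hub u rfl
    simp only at hhi
    constructor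
    · rintro ⟨h1, h2⟩
      have hxu : ¬ u ≤ x := by
        intro hc
        simp [pvUbHit, hc] at h1
      have := choose_le_bound d r x h2
      refine ⟨h2, ?_⟩
      split at hhi <;> omega
    · rintro ⟨h2, h3⟩
      have hxu : x < u := by split at hhi <;> [omega; omega]
      refine ⟨?_, h2⟩
      simp [pvUbHit]
      omega

-- unfolding lemma for macFind (the lets written out)
theorem macFind_def (d r cap : Nat) :
    macFind d r cap = macSearch ((if cap < (macGallop (cap + 1) d r cap (d + 1) 1).1 + (macGallop (cap + 1) d r cap (d + 1) 1).2 - 1 then cap else (macGallop (cap + 1) d r cap (d + 1) 1).1 + (macGallop (cap + 1) d r cap (d + 1) 1).2 - 1) - (macGallop (cap + 1) d r cap (d + 1) 1).1) d r (macGallop (cap + 1) d r cap (d + 1) 1).1 (if cap < (macGallop (cap + 1) d r cap (d + 1) 1).1 + (macGallop (cap + 1) d r cap (d + 1) 1).2 - 1 then cap else (macGallop (cap + 1) d r cap (d + 1) 1).1 + (macGallop (cap + 1) d r cap (d + 1) 1).2 - 1) := rfl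

-- the four interval facts about B's gallop-plus-binary-search candidate
theorem macFind_facts (d r cap : Nat) (hcap : d + 2 ≤ cap) :
    d + 1 ≤ macFind d r cap ∧ macFind d r cap ≤ cap ∧
      (macFind d r cap = d + 1 ∨ Nat.choose (macFind d r cap) (d + 1) ≤ r) ∧
      (macFind d r cap = cap ∨ r < Nat.choose (macFind d r cap + 1) (d + 1)) := by
  rw [macFind_def]
  set G := macGallop (cap + 1) d r cap (d + 1) 1 with hG
  have hl : d + 1 ≤ G.1 := by rw [hG]; exact macGallop_ge d r cap _ _ _
  have hs : 1 ≤ G.2 := by rw [hG]; exact macGallop_step d r cap _ _ _ (le_refl 1)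
  have hgood : G.1 = d + 1 ∨ (Nat.choose G.1 (d + 1) ≤ r ∧ G.1 ≤ cap) := by
    rw [hG]; exact macGallop_good d r cap _ _ _
  have hstop : ¬(G.1 + G.2 ≤ cap ∧ Nat.choose (G.1 + G.2) (d + 1) ≤ r) := by
    rw [hG]; exact macGallop_stop d r cap _ _ _ (by omega) (le_refl 1)
  have hlcap : G.1 ≤ cap := by
    rcases hgood with h | h
    · omega
    · exact h.2
  set hi := if cap < G.1 + G.2 - 1 then cap else G.1 + G.2 - 1 with hhi
  have hlhi : G.1 ≤ hi := by rw [hhi]; split <;> omega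
  have hhicap : hi ≤ cap := by rw [hhi]; split <;> omega
  have h1 := macSearch_ge (hi - G.1) d r G.1 hi
  have h2 := macSearch_le (hi - G.1) d r G.1 hi hlhi
  have h3 := macSearch_q (hi - G.1) d r G.1 hi
  have h4 := macSearch_stop (hi - G.1) d r G.1 hi hlhi (le_refl _)
  refine ⟨by omega, by omega, ?_, ?_⟩
  · rcases h3 with h | h
    · rw [h]
      rcases hgood with hg | hg
      · left; exact hg
      · right; exact hg.1
    · right; exact h
  · rcases h4 with h | h
    · rcases Nat.lt_or_ge hi cap with hlt | hge
      · by_cases hc : cap < G.1 + G.2 - 1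
        · have hx : hi = cap := by rw [hhi, if_pos hc]
          omega
        · have hhieq : hi = G.1 + G.2 - 1 := by rw [hhi, if_neg hc]
          have hnc : ¬ Nat.choose (G.1 + G.2) (d + 1) ≤ r := fun hx => hstop ⟨by omega, hx⟩
          right
          rw [h]
          have he : hi + 1 = G.1 + G.2 := by omega
          rw [he]
          omega
      · left
        rw [h]
        omega
    · right; exact h

-- A's linear scan and B's gallop-plus-binary search find the same candidate.
theorem grow_eq_find (d r : Nat) (ub : Option Nat) (cap : Nat)
    (hcap : cap = (match ub with
      | some u => if u - 1 < r + (d + 1) then u - 1 else r + (d + 1)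
      | none => r + (d + 1)))
    (hub : ∀ u, ub = some u → d + 2 ≤ u)
    (hbig : d + 2 ≤ cap) :
    macGrow (r + 1) d r ub (d + 1) = macFind d r cap := by
  obtain ⟨hf1, hf2, hf3, hf4⟩ := macFind_facts d r cap hbig
  have hge : d + 1 ≤ macGrow (r + 1) d r ub (d + 1) := macGrow_ge (r + 1) d r ub (d + 1)
  have hmem := macGrow_mem (r + 1) d r ub (d + 1)
  have hstop := macGrow_stop (r + 1) d r ub (d + 1) (by omega)
  have hiff := contP_iff d r ub cap hcap hub
  have hghi : macGrow (r + 1) d r ub (d + 1) ≤ cap := by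
    rcases Nat.eq_or_lt_of_le hge with h | h
    · omega
    · exact ((hiff _).mp (hmem _ h (le_refl _))).2
  rcases Nat.lt_trichotomy (macGrow (r + 1) d r ub (d + 1)) (macFind d r cap) with h | h | h
  · -- g < f : f > d+1, so comb(f) ≤ r; monotonicity contradicts the stop at g
    have hqs : Nat.choose (macFind d r cap) (d + 1) ≤ r := by
      rcases hf3 with h2 | h2
      · omega
      · exact h2
    have hq : Nat.choose (macGrow (r + 1) d r ub (d + 1) + 1) (d + 1) ≤ r :=
      le_trans (Nat.choose_le_choose (d + 1) (by omega)) hqs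
    exact absurd ((hiff _).mpr ⟨hq, by omega⟩) hstop
  · exact h
  · -- f < g : f+1 lies in (d+1, g], so the scan continued past it, but the search stopped below it
    have hc := (hiff _).mp (hmem (macFind d r cap + 1) (by omega) (by omega))
    rcases hf4 with h2 | h2
    · omega
    · exact absurd hc.1 (by omega)

-- squeezed tail of A's loop: with upper bound n+1, every degree takes comb(d, d) = 1
-- until the remainder runs out
theorem macLoop_tail (n : Nat) : ∀ r total, macLoop n r (some (n + 1)) total = total + min r n := by
  induction n with
  | zero => intro r total; simp [macLoop]
  | succ n ih =>
    intro r total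
    rw [macLoop]
    have hg : macGrow (r + 1) n r (some (n + 2)) (n + 1) = n + 1 := by
      rw [macGrow]
      simp [pvUbHit]
    rw [hg]
    have h1 : pyComb (n + 1) (n + 1) = 1 := by rw [pyComb_eq, Nat.choose_self]
    have h2 : pyComb (n + 2) (n + 2) = 1 := by rw [pyComb_eq, Nat.choose_self]
    by_cases hr : 1 ≤ r
    · rw [if_pos ⟨by omega, by rw [h1]; omega⟩]
      rw [h1, h2, ih]
      omega
    · rw [if_neg (by rw [h1]; omega)]
      rw [ih]
      omega

-- with remainder 0 nothing is ever added
theorem macLoop_zero (cd : Nat) (ub : Option Nat) (total : Nat) :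
    macLoop (cd + 1) 0 ub total = total := by
  rw [macLoop]
  have hg : macGrow 1 cd 0 ub (cd + 1) = cd + 1 := by
    rw [macGrow]
    split
    · rfl
    · rw [if_pos]
      rw [pyComb_eq]
      have : 0 < Nat.choose (cd + 2) (cd + 1) := Nat.choose_pos (by omega)
      omega
  rw [hg]
  rw [if_neg (by rw [pyComb_eq, Nat.choose_self]; omega)]
  cases cd with
  | zero => rfl
  | succ n => rw [macLoop_tail]; omega

-- Unfolding lemmas for macLoopB at a successor degree.
theorem macLoopB_succ_none (cd r total : Nat) :
    macLoopB (cd + 1) r none total =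
      (if (r + (cd + 1)) ≤ cd + 1 then total + (if r < cd + 1 then r else cd + 1)
      else
        if pyComb (macFind cd r (r + (cd + 1))) (cd + 1) ≤ r then
          macLoopB cd (r - pyComb (macFind cd r (r + (cd + 1))) (cd + 1)) (some (macFind cd r (r + (cd + 1)))) (total + pyComb ((macFind cd r (r + (cd + 1))) + 1) (cd + 2))
        else macLoopB cd r (some (cd + 1)) total) := rfl

theorem macLoopB_succ_some (cd r u total : Nat) :
    macLoopB (cd + 1) r (some u) total =
      (if (if u - 1 < r + (cd + 1) then u - 1 else r + (cd + 1)) ≤ cd + 1 then total + (if r < cd + 1 then r else cd + 1)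
      else
        if pyComb (macFind cd r (if u - 1 < r + (cd + 1) then u - 1 else r + (cd + 1))) (cd + 1) ≤ r then
          macLoopB cd (r - pyComb (macFind cd r (if u - 1 < r + (cd + 1) then u - 1 else r + (cd + 1))) (cd + 1)) (some (macFind cd r (if u - 1 < r + (cd + 1) then u - 1 else r + (cd + 1)))) (total + pyComb ((macFind cd r (if u - 1 < r + (cd + 1) then u - 1 else r + (cd + 1))) + 1) (cd + 2))
        else macLoopB cd r (some (cd + 1)) total) := rfl

-- The two outer loops agree (invariant: any recorded upper bound exceeds the next degree).
theorem loop_eq (cd : Nat) : ∀ (r : Nat) (ub : Option Nat) (total : Nat),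
    (∀ u, ub = some u → cd + 1 ≤ u) → macLoop cd r ub total = macLoopB cd r ub total := by
  induction cd with
  | zero => intro r ub total _; rfl
  | succ cd ih =>
    intro r ub total hub
    cases ub with
    | none =>
      rw [macLoopB_succ_none]
      by_cases hsq : r + (cd + 1) ≤ cd + 1
      · rw [if_pos hsq]
        have hr : r = 0 := by omega
        subst hr
        rw [macLoop_zero]
        rw [if_pos (by omega)]
        omega
      · rw [if_neg hsq]
        have hbig : cd + 2 ≤ r + (cd + 1) := by omega
        have hgs := grow_eq_find cd r none (r + (cd + 1)) rfl (by intro u hu; cases hu) hbig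
        have hcge : cd + 1 ≤ macGrow (r + 1) cd r none (cd + 1) := macGrow_ge (r + 1) cd r none (cd + 1)
        rw [macLoop, ← hgs]
        simp only [pyComb_eq]
        by_cases hq : Nat.choose (macGrow (r + 1) cd r none (cd + 1)) (cd + 1) ≤ r
        · rw [if_pos ⟨hcge, hq⟩, if_pos hq]
          obtain ⟨hf1, hf2, hf3, hf4⟩ := macFind_facts cd r _ hbig
          rw [hgs]
          exact ih _ _ _ (by intro u hu; cases hu; omega)
        · rw [if_neg (fun hc2 => hq hc2.2), if_neg hq]
          exact ih _ _ _ (by intro u hu; cases hu; omega)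
    | some u =>
      have hu : cd + 2 ≤ u := hub u rfl
      rw [macLoopB_succ_some]
      by_cases hsq : (if u - 1 < r + (cd + 1) then u - 1 else r + (cd + 1)) ≤ cd + 1
      · rw [if_pos hsq]
        rcases Nat.eq_zero_or_pos r with hr | hr
        · subst hr
          rw [macLoop_zero]
          rw [if_pos (by omega)]
          omega
        · have hueq : u = cd + 2 := by split at hsq <;> omega
          subst hueq
          rw [macLoop_tail]
          have hmin : (if r < cd + 1 then r else cd + 1) = min r (cd + 1) := by split <;> omega
          rw [hmin]
      · rw [if_neg hsq]
        have hbig : cd + 2 ≤ (if u - 1 < r + (cd + 1) then u - 1 else r + (cd + 1)) := by omega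
        have hgs := grow_eq_find cd r (some u) (if u - 1 < r + (cd + 1) then u - 1 else r + (cd + 1)) rfl
          (by intro v hv; cases hv; exact hu) hbig
        have hcge : cd + 1 ≤ macGrow (r + 1) cd r (some u) (cd + 1) := macGrow_ge (r + 1) cd r (some u) (cd + 1)
        rw [macLoop, ← hgs]
        simp only [pyComb_eq]
        by_cases hq : Nat.choose (macGrow (r + 1) cd r (some u) (cd + 1)) (cd + 1) ≤ r
        · rw [if_pos ⟨hcge, hq⟩, if_pos hq]
          obtain ⟨hf1, hf2, hf3, hf4⟩ := macFind_facts cd r _ hbig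
          rw [hgs]
          exact ih _ _ _ (by intro v hv; cases hv; omega)
        · rw [if_neg (fun hc2 => hq hc2.2), if_neg hq]
          exact ih _ _ _ (by intro v hv; cases hv; omega)

-- ===== VERDICT (by name: the statement is the Claim_ definition above) =====
theorem macaulay_next_spec : Claim_equal_macaulay_next := by
  intro value degree _ _
  unfold Spec_macaulay_next macaulay_next macaulay_next_alt
  split
  · rfl
  · split
    · rfl
    · split
      · rfl
      · rw [loop_eq _ _ _ _ (by intro u hu; cases hu)]
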